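-- pv_equiv track=rewrite | github.com/jimmyjohn0315/LeetCode-Daily | 1546. Maximum Number of Non-Overlapping Subarrays With Sum Equals Target.py | maxNonOverlapping
-- ===== SOURCE A (Python) =====
-- from typing import List
--
-- def maxNonOverlapping(nums: List[int], target: int) -> int:
--     n = len(nums)
--     res = 0
--     prefix = {0}
--     total = 0
--     for i in range(n):
--         total += nums[i]
--         if total - target in prefix:
--             res += 1
--             prefix.clear()
--             total = 0
--         prefix.add(total)
--     return res
-- ===== SOURCE B (Python) =====
-- def maxNonOverlapping(nums, target):
--     total = 0
--     dp = 0
--     sum_map = {0: 0}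
--     for x in nums:
--         total += x
--         if total - target in sum_map:
--             c = sum_map[total - target] + 1
--             if c > dp:
--                 dp = c
--         sum_map[total] = dp
--     return dp
-- ===== Notes on version B (the rewrite author's own statement) =====
-- stated objective: alternative
-- what changed: Replaced A's greedy scan that clears a prefix-sum set and resets the running total at each hit with a DP over prefixes: a never-cleared dict maps each prefix sum to the best count achievable there, and dp is updated by the recurrence dp = max(dp, sum_map[total-target]+1).
import Mathlib
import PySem

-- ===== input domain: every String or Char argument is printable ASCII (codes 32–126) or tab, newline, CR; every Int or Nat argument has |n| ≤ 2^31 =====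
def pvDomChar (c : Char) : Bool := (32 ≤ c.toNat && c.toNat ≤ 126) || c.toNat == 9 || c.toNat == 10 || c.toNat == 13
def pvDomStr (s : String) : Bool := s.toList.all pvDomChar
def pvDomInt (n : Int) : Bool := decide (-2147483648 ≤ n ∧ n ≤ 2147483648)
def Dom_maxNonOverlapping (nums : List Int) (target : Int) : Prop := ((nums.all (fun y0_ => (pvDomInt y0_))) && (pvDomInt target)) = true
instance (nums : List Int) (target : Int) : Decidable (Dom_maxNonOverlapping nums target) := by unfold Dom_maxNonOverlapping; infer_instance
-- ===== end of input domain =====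

-- B replaces A's greedy reset (clear the set, zero the total) by a DP over prefix sums
-- with a never-cleared map; an alternative algorithm of the same cost.

-- ===== PORT A =====
-- One loop step of A: total += x; if total - target in prefix: res += 1, clear, total = 0; add total.
def maxNonOverlappingStepA (target : Int) (st : Int × PySem.Set Int × Int) (x : Int) :
    Int × PySem.Set Int × Int :=
  let res := st.1
  let pre := st.2.1
  let total := st.2.2 + x
  if PySem.Set.contains pre (total - target) then
    (res + 1, PySem.Set.add PySem.Set.empty (0 : Int), (0 : Int))
  else
    (res, PySem.Set.add pre total, total)

def maxNonOverlapping (nums : List Int) (target : Int) : Int :=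
  (nums.foldl (maxNonOverlappingStepA target)
    ((0 : Int), PySem.Set.add PySem.Set.empty (0 : Int), (0 : Int))).1

-- ===== PORT B =====
-- One loop step of B: total += x; if total - target in sum_map: dp = max(dp, that + 1); sum_map[total] = dp.
def maxNonOverlappingStepB (target : Int) (st : Int × Int × PySem.Dict Int Int) (x : Int) :
    Int × Int × PySem.Dict Int Int :=
  let total := st.1 + x
  let dp := st.2.1
  let m := st.2.2
  let dp :=
    match m.get? (total - target) with
    | some v => if v + 1 > dp then v + 1 else dp
    | none => dp
  (total, dp, m.insert total dp)

def maxNonOverlapping_alt (nums : List Int) (target : Int) : Int :=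
  (nums.foldl (maxNonOverlappingStepB target)
    ((0 : Int), (0 : Int), PySem.Dict.ofList [((0 : Int), (0 : Int))])).2.1

-- ===== PRECONDITION & SPEC =====
def Spec_maxNonOverlapping (nums : List Int) (target : Int) (out : Int) : Prop := out = maxNonOverlapping_alt nums target
instance (nums : List Int) (target : Int) (out : Int) : Decidable (Spec_maxNonOverlapping nums target out) := by unfold Spec_maxNonOverlapping; infer_instance

-- ===== CLAIM (what is proved, stated in full; the proofs are below) =====
def Claim_equal_maxNonOverlapping : Prop := ∀ (nums : List Int) (target : Int), Dom_maxNonOverlapping nums target → Spec_maxNonOverlapping nums target (maxNonOverlapping nums target)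

-- ===== LEMMAS AND PROOFS =====

-- The coupling invariant between A's state (res, P, t) and B's state (T, dp, m):
-- S is the true prefix sum at A's last reset point; T = t + S; dp = res; every
-- element s of A's current set corresponds to a map entry (s + S) ↦ res; and every
-- map entry is ≤ res, reaching res exactly on keys corresponding to A's current set.
def NOInv (S res : Int) (P : PySem.Set Int) (t T dp : Int) (m : PySem.Dict Int Int) : Prop :=
  dp = res ∧ T = t + S ∧
  (∀ s ∈ P, m.get? (s + S) = some res) ∧
  (∀ k v, m.get? k = some v → v ≤ res ∧ (v = res → (k - S) ∈ P))

theorem NOInv_loop (target : Int) (l : List Int) :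
    ∀ (S res t T dp : Int) (P : PySem.Set Int) (m : PySem.Dict Int Int),
    NOInv S res P t T dp m →
    (l.foldl (maxNonOverlappingStepA target) (res, P, t)).1
      = (l.foldl (maxNonOverlappingStepB target) (T, dp, m)).2.1 := by
  induction l with
  | nil =>
    intro S res t T dp P m h
    exact h.1.symm
  | cons x l ih =>
    intro S res t T dp P m h
    obtain ⟨hdp, hT, hmem, hbound⟩ := h
    simp only [List.foldl_cons]
    by_cases hc : (t + x - target) ∈ P
    · -- A hits: res + 1, set := {0}, total := 0; B's lookup finds value res, dp := res + 1.
      have hAstep : maxNonOverlappingStepA target (res, P, t) x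
          = (res + 1, PySem.Set.add PySem.Set.empty (0 : Int), (0 : Int)) := by
        simp [maxNonOverlappingStepA, hc]
      have hget : m.get? (T + x - target) = some res := by
        have h1 := hmem (t + x - target) hc
        have he : t + x - target + S = T + x - target := by omega
        rwa [he] at h1
      have hBstep : maxNonOverlappingStepB target (T, dp, m) x
          = (T + x, res + 1, m.insert (T + x) (res + 1)) := by
        simp only [maxNonOverlappingStepB, hget]
        have hgt : res + 1 > dp := by omega
        simp [hdp]
      rw [hAstep, hBstep]
      apply ih (T + x) (res + 1) 0 (T + x) (res + 1) _ _
      refine ⟨rfl, by omega, ?_, ?_⟩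
      · intro s hs
        have hs0 : s = 0 := by
          simpa [PySem.Set.add, PySem.Set.empty, PySem.Set.contains] using hs
        subst hs0
        simp [PySem.Dict.get?_insert_self]
      · intro k v hkv
        rw [PySem.Dict.get?_insert] at hkv
        by_cases hk : k = T + x
        · simp [hk] at hkv
          refine ⟨by omega, fun _ => ?_⟩
          subst hk
          simp [PySem.Set.add, PySem.Set.empty]
        · simp only [if_neg hk] at hkv
          obtain ⟨hle, _⟩ := hbound k v hkv
          exact ⟨by omega, fun hv => absurd hv (by omega)⟩
    · -- A misses: any map value at key T + x - target is < res, so dp is unchanged.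
      have hAstep : maxNonOverlappingStepA target (res, P, t) x
          = (res, PySem.Set.add P (t + x), t + x) := by
        simp [maxNonOverlappingStepA, hc]
      have hdp' : (match m.get? (T + x - target) with
          | some v => if v + 1 > dp then v + 1 else dp
          | none => dp) = dp := by
        cases hg : m.get? (T + x - target) with
        | none => rfl
        | some v =>
          obtain ⟨hle, hres⟩ := hbound _ _ hg
          have hvlt : v < res := by
            rcases lt_or_eq_of_le hle with h | h
            · exact h
            · exfalso
              have hmem' := hres h
              have he : T + x - target - S = t + x - target := by omega
              rw [he] at hmem'
              exact hc hmem'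
          have hng : ¬ (v + 1 > dp) := by omega
          simp [hng]
      have hBstep : maxNonOverlappingStepB target (T, dp, m) x
          = (T + x, dp, m.insert (T + x) dp) := by
        simp only [maxNonOverlappingStepB]
        rw [hdp']
      rw [hAstep, hBstep]
      apply ih S res (t + x) (T + x) dp _ _
      refine ⟨hdp, by omega, ?_, ?_⟩
      · intro s hs
        rw [PySem.Set.mem_add] at hs
        rw [PySem.Dict.get?_insert]
        rcases hs with hs | hs
        · by_cases he : s + S = T + x
          · simp [he, hdp]
          · simp only [if_neg he]
            exact hmem s hs
        · subst hs
          have he : t + x + S = T + x := by omega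
          simp [he, hdp]
      · intro k v hkv
        rw [PySem.Dict.get?_insert] at hkv
        by_cases hk : k = T + x
        · simp [hk] at hkv
          refine ⟨by omega, fun _ => ?_⟩
          subst hk
          rw [PySem.Set.mem_add]
          right
          omega
        · simp only [if_neg hk] at hkv
          obtain ⟨hle, hres⟩ := hbound k v hkv
          exact ⟨hle, fun hv => by rw [PySem.Set.mem_add]; exact Or.inl (hres hv)⟩

-- ===== VERDICT (by name: the statement is the Claim_ definition above) =====
theorem maxNonOverlapping_spec : Claim_equal_maxNonOverlapping := by
  intro nums target _
  unfold Spec_maxNonOverlapping maxNonOverlapping maxNonOverlapping_alt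
  refine NOInv_loop target nums 0 0 0 0 0 _ _ ⟨rfl, by omega, ?_, ?_⟩
  · intro s hs
    have hs0 : s = 0 := by
      simpa [PySem.Set.add, PySem.Set.empty, PySem.Set.contains] using hs
    subst hs0
    decide
  · intro k v hkv
    have hm : PySem.Dict.ofList [((0 : Int), (0 : Int))]
        = PySem.Dict.mk [((0 : Int), (0 : Int))] := rfl
    rw [hm, PySem.Dict.get?_mk_cons] at hkv
    by_cases hk : ((0 : Int) == k) = true
    · rw [if_pos hk] at hkv
      have hk0 : k = 0 := (beq_iff_eq.mp hk).symm
      have hv0 : v = 0 := by injection hkv with h; omega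
      subst hk0; subst hv0
      refine ⟨le_refl 0, fun _ => ?_⟩
      simp [PySem.Set.add, PySem.Set.empty, PySem.Set.contains]
    · rw [if_neg hk] at hkv
      exact absurd hkv (by simp [PySem.Dict.get?])
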